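-- pv_equiv track=rewrite | github.com/moghadban/SonosphereAI | backend/lyrics_generator.py | filter_corpus_by_bias
-- ===== SOURCE A (Python) =====
-- def filter_corpus_by_bias(corpus_text, bias_keywords):
--     """Keep only lines containing at least one of the bias keywords."""
--     if not bias_keywords:
--         return corpus_text
--     filtered_lines = []
--     for line in corpus_text.split('\n'):
--         line_lower = line.lower()
--         if any(k in line_lower for k in bias_keywords):
--             filtered_lines.append(line)
--     return "\n".join(filtered_lines)
-- ===== SOURCE B (Python) =====
-- def filter_corpus_by_bias(corpus_text, bias_keywords):
--     """Keep only lines containing at least one of the bias keywords.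
--
--     Keyword-major strategy: lower every line once, then sweep the keyword list,
--     OR-ing a boolean keep-mask over all lines, and finally join the kept lines.
--     """
--     if not bias_keywords:
--         return corpus_text
--     lines = corpus_text.split('\n')
--     lowered = [ln.lower() for ln in lines]
--     keep = [False] * len(lines)
--     for k in bias_keywords:
--         keep = [m or (k in ll) for m, ll in zip(keep, lowered)]
--     return "\n".join(ln for ln, m in zip(lines, keep) if m)
-- ===== Notes on version B (the rewrite author's own statement) =====
-- stated objective: alternative
-- what changed: Line-major scan with any() per line is replaced by a keyword-major sweep that ORs a boolean keep-mask over the pre-lowered lines, then joins the masked lines.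
import Mathlib
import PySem

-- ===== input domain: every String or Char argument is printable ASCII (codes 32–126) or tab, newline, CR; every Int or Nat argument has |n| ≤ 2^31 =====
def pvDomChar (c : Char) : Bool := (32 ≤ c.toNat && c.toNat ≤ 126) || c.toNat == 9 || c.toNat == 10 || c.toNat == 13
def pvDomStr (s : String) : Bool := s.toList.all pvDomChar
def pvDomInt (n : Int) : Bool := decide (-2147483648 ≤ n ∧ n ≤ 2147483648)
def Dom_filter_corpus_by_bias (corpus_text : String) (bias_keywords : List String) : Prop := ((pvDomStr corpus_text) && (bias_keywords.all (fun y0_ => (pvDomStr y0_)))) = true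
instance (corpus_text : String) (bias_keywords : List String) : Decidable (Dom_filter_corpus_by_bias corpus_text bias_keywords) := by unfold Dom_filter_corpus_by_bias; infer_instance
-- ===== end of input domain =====

-- B replaces the line-major any()-scan by a keyword-major sweep over a boolean keep-mask (alternative decomposition, same cost).

-- ===== PORT A =====
def filter_corpus_by_bias (corpus_text : String) (bias_keywords : List String) : String :=
  if bias_keywords = [] then corpus_text
  else
    let filtered_lines :=
      ((PySem.Str.split? corpus_text "\n").getD []).foldl
        (fun acc line =>
          let line_lower := PySem.Str.lower line
          if bias_keywords.any (fun k => PySem.Str.isIn k line_lower) then acc ++ [line] else acc)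
        []
    PySem.Str.join "\n" filtered_lines

-- ===== PORT B =====
def filter_corpus_by_bias_alt (corpus_text : String) (bias_keywords : List String) : String :=
  if bias_keywords = [] then corpus_text
  else
    let lines := (PySem.Str.split? corpus_text "\n").getD []
    let lowered := lines.map PySem.Str.lower
    let keep0 : List Bool := List.replicate lines.length false
    let keep := bias_keywords.foldl
      (fun keep k => (keep.zip lowered).map (fun p => p.1 || PySem.Str.isIn k p.2)) keep0
    PySem.Str.join "\n" (((lines.zip keep).filter (fun p => p.2)).map (fun p => p.1))

-- ===== PRECONDITION & SPEC =====
def Spec_filter_corpus_by_bias (corpus_text : String) (bias_keywords : List String) (out : String) : Prop := out = filter_corpus_by_bias_alt corpus_text bias_keywords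
instance (corpus_text : String) (bias_keywords : List String) (out : String) : Decidable (Spec_filter_corpus_by_bias corpus_text bias_keywords out) := by unfold Spec_filter_corpus_by_bias; infer_instance

-- ===== CLAIM (what is proved, stated in full; the proofs are below) =====
def Claim_equal_filter_corpus_by_bias : Prop := ∀ (corpus_text : String) (bias_keywords : List String), Dom_filter_corpus_by_bias corpus_text bias_keywords → Spec_filter_corpus_by_bias corpus_text bias_keywords (filter_corpus_by_bias corpus_text bias_keywords)

-- ===== LEMMAS AND PROOFS =====

-- re-zipping the second component: map over zip, zipped again with the same list
theorem pv_zipmap_zip {α β γ : Type} (g : α × β → α) (f : α × β → γ) :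
    ∀ (as : List α) (bs : List β),
      (((as.zip bs).map g).zip bs).map f = (as.zip bs).map (fun p => f (g p, p.2)) := by
  intro as
  induction as with
  | nil => intro bs; simp
  | cons a as ih =>
    intro bs
    cases bs with
    | nil => simp
    | cons b bs => simp [ih]

-- the keyword fold computes, elementwise, start OR (any keyword occurs)
theorem pv_fold_keep (lowered : List String) :
    ∀ (ks : List String) (keep : List Bool), keep.length = lowered.length →
      ks.foldl (fun keep k => (keep.zip lowered).map (fun p => p.1 || PySem.Str.isIn k p.2)) keep
        = (keep.zip lowered).map (fun p => p.1 || ks.any (fun k => PySem.Str.isIn k p.2)) := by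
  intro ks
  induction ks with
  | nil =>
    intro keep hlen
    simp only [List.foldl_nil, List.any_nil, Bool.or_false]
    rw [show (fun p : Bool × String => p.1) = Prod.fst from rfl, List.map_fst_zip (by omega)]
  | cons k ks ih =>
    intro keep hlen
    rw [List.foldl_cons, ih _ (by simp [List.length_zip, hlen]), pv_zipmap_zip]
    simp [Bool.or_assoc]

-- zipping with replicate false then mapping is a plain map
theorem pv_zip_replicate_false {β γ : Type} (f : Bool → β → γ) :
    ∀ (bs : List β),
      ((List.replicate bs.length false).zip bs).map (fun p => f p.1 p.2)
        = bs.map (fun b => f false b) := by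
  intro bs
  induction bs with
  | nil => rfl
  | cons b bs ih => simpa [List.replicate_succ] using ih

-- filtering by a mask that is 'map h' of the lines is List.filter h
theorem pv_mask_filter {α : Type} (h : α → Bool) :
    ∀ (ls : List α),
      ((ls.zip (ls.map h)).filter (fun p => p.2)).map (fun p => p.1) = ls.filter h := by
  intro ls
  induction ls with
  | nil => rfl
  | cons l ls ih =>
    by_cases hl : h l <;> simp [hl, ih]

-- A's accumulator loop is List.filter
theorem pv_foldl_filter {α : Type} (p : α → Bool) :
    ∀ (ls : List α) (acc : List α),
      ls.foldl (fun acc x => if p x then acc ++ [x] else acc) acc = acc ++ ls.filter p := by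
  intro ls
  induction ls with
  | nil => intro acc; simp
  | cons l ls ih =>
    intro acc
    by_cases hl : p l <;> simp [hl, ih]

-- ===== VERDICT (by name: the statement is the Claim_ definition above) =====
theorem filter_corpus_by_bias_spec : Claim_equal_filter_corpus_by_bias := by
  intro corpus_text bias_keywords _
  unfold Spec_filter_corpus_by_bias filter_corpus_by_bias filter_corpus_by_bias_alt
  by_cases hk : bias_keywords = []
  · simp [hk]
  · simp only [hk, if_false]
    rw [pv_fold_keep _ _ _ (by simp)]
    have hrep := pv_zip_replicate_false
      (fun (b : Bool) (ll : String) => b || bias_keywords.any (fun k => PySem.Str.isIn k ll))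
      (((PySem.Str.split? corpus_text "\n").getD []).map PySem.Str.lower)
    simp only [List.length_map] at hrep
    rw [hrep]
    simp only [Bool.false_or, List.map_map]
    rw [pv_mask_filter ((fun b => bias_keywords.any (fun k => PySem.Str.isIn k b)) ∘ PySem.Str.lower)]
    rw [pv_foldl_filter]
    simp [Function.comp_def]
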